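-- pv_equiv track=rewrite | github.com/Zeresenayaregal/CodeWars | kata1/main.py | length_of_sequence
-- ===== SOURCE A (Python) =====
-- def length_of_sequence(arr,n):
--     occrArr= []
--     i = 0
--     while True:
--         try:
--             pos = arr.index(n, i)
--             occrArr.append(pos)
--             i = pos + 1
--         except ValueError:
--             break
--
--     if(len(occrArr) < 2 or len(occrArr) > 2):
--         return 0
--     newArr = arr[occrArr[0]:occrArr[1]+1]
--
--     return len(newArr)
-- ===== SOURCE B (Python) =====
-- def length_of_sequence(arr, n):
--     # single pass, three-stage streaming state machine over one iterator:
--     # skip to the first occurrence, measure the span to the second, then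
--     # return 0 if a third occurrence remains.
--     it = iter(arr)
--     for x in it:
--         if x == n:
--             break
--     else:
--         return 0
--     span = 1
--     for x in it:
--         span += 1
--         if x == n:
--             break
--     else:
--         return 0
--     for x in it:
--         if x == n:
--             return 0
--     return span
-- ===== Notes on version B (the rewrite author's own statement) =====
-- stated objective: alternative
-- what changed: B replaces A's index-loop that collects the full list of occurrence positions and then slices with a single streaming pass structured as a three-stage state machine over one iterator: skip to the first occurrence, count the inclusive span up to the second, and bail out with 0 if any third occurrence follows.
import Mathlib
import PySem

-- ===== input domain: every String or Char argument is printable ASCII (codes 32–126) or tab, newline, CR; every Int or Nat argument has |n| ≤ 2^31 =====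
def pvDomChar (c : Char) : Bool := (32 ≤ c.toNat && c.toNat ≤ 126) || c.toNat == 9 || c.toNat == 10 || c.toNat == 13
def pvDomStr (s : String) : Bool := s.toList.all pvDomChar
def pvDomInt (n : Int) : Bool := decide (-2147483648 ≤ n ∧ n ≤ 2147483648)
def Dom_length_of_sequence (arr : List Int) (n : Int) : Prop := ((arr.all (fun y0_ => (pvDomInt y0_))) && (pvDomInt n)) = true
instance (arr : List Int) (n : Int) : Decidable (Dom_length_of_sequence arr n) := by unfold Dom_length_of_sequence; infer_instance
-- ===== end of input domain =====

-- B replaces A's position-collecting index loop and slice with a single streaming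
-- three-stage state machine (skip to first occurrence, span to second, reject a third);
-- alternative decomposition, same O(n) cost. Return-value equivalence only.

-- ===== PORT A =====
-- the 'while True: pos = arr.index(n, i); append; i = pos+1 / except ValueError: break'
-- loop: each iteration searches the remaining suffix and records the absolute position
def pvOccGo (rest : List Int) (n : Int) (i : Nat) : List Nat :=
  match h : PySem.List.index? rest n with
  | none => []
  | some k => (i + k) :: pvOccGo (rest.drop (k + 1)) n (i + k + 1)
termination_by rest.length
decreasing_by
  · obtain ⟨pre, suf, hx, hlen, _⟩ := (PySem.List.index?_eq_some_iff _ _ _).1 h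
    simp [hx, ← hlen]
    omega

def length_of_sequence (arr : List Int) (n : Int) : Int :=
  let occrArr := pvOccGo arr n 0
  if occrArr.length < 2 ∨ occrArr.length > 2 then 0
  else
    let newArr := PySem.List.slice arr (some ((occrArr.getD 0 0 : Nat) : Int))
        (some (((occrArr.getD 1 0 : Nat) : Int) + 1))
    (newArr.length : Int)

-- ===== PORT B =====
-- stage 1: 'for x in it: if x == n: break / else: return 0' — consume up to the first n
def pvSkipToFirst (l : List Int) (n : Int) : Option (List Int) :=
  match l with
  | [] => none
  | x :: xs => if x = n then some xs else pvSkipToFirst xs n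

-- stage 2: 'span = 1; for x in it: span += 1; if x == n: break / else: return 0'
def pvSpanToSecond (l : List Int) (n : Int) (span : Int) : Option (Int × List Int) :=
  match l with
  | [] => none
  | x :: xs => if x = n then some (span + 1, xs) else pvSpanToSecond xs n (span + 1)

-- stage 3: 'for x in it: if x == n: return 0'
def pvHasThird (l : List Int) (n : Int) : Bool :=
  match l with
  | [] => false
  | x :: xs => if x = n then true else pvHasThird xs n

def length_of_sequence_alt (arr : List Int) (n : Int) : Int :=
  match pvSkipToFirst arr n with
  | none => 0
  | some rest1 =>
    match pvSpanToSecond rest1 n 1 with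
    | none => 0
    | some (span, rest2) => if pvHasThird rest2 n then 0 else span

-- ===== PRECONDITION & SPEC =====
def Spec_length_of_sequence (arr : List Int) (n : Int) (out : Int) : Prop := out = length_of_sequence_alt arr n
instance (arr : List Int) (n : Int) (out : Int) : Decidable (Spec_length_of_sequence arr n out) := by unfold Spec_length_of_sequence; infer_instance

-- ===== CLAIM (what is proved, stated in full; the proofs are below) =====
def Claim_equal_length_of_sequence : Prop := ∀ (arr : List Int) (n : Int), Dom_length_of_sequence arr n → Spec_length_of_sequence arr n (length_of_sequence arr n)

-- ===== LEMMAS AND PROOFS =====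

/-- All positions (offset by `i`) of `n` in a list, structurally. -/
def posAux (n : Int) : List Int → Nat → List Nat
  | [], _ => []
  | x :: xs, i => if x = n then i :: posAux n xs (i + 1) else posAux n xs (i + 1)

theorem posAux_eq_nil (n : Int) (l : List Int) (hn : n ∉ l) (i : Nat) :
    posAux n l i = [] := by
  induction l generalizing i with
  | nil => rfl
  | cons x xs ih =>
    simp only [List.mem_cons, not_or] at hn
    simp [posAux, Ne.symm hn.1, ih hn.2]

theorem posAux_append (n : Int) (p l : List Int) (hn : n ∉ p) (i : Nat) :
    posAux n (p ++ l) i = posAux n l (i + p.length) := by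
  induction p generalizing i with
  | nil => simp
  | cons x xs ih =>
    simp only [List.mem_cons, not_or] at hn
    simp only [List.cons_append, posAux, Ne.symm hn.1, if_false]
    rw [ih hn.2]
    congr 1
    simp
    omega

theorem length_posAux (n : Int) (l : List Int) (i : Nat) :
    (posAux n l i).length = l.count n := by
  induction l generalizing i with
  | nil => rfl
  | cons x xs ih =>
    by_cases hx : x = n <;> simp [posAux, hx, ih]

theorem pvOccGo_eq_posAux (n : Int) (rest : List Int) (i : Nat) :
    pvOccGo rest n i = posAux n rest i := by
  induction hL : rest.length using Nat.strong_induction_on generalizing rest i with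
  | _ L ih =>
    rw [pvOccGo]
    split
    next h =>
      rw [posAux_eq_nil n rest ((PySem.List.index?_eq_none_iff _ _).1 h)]
    next k h =>
      obtain ⟨pre, suf, hx, hlen, hmem⟩ := (PySem.List.index?_eq_some_iff _ _ _).1 h
      have hdrop : rest.drop (k + 1) = suf := by
        subst hx
        rw [show pre ++ n :: suf = (pre ++ [n]) ++ suf by simp,
          List.drop_left' (by simp [hlen])]
      have hlt : suf.length < L := by
        subst hx; simp at hL; omega
      rw [hdrop, ih suf.length hlt suf (i + k + 1) rfl]
      subst hx
      rw [posAux_append n pre _ hmem i, hlen]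
      simp [posAux]

theorem pvSkip_append (n : Int) (p l : List Int) (hp : n ∉ p) :
    pvSkipToFirst (p ++ l) n = pvSkipToFirst l n := by
  induction p with
  | nil => rfl
  | cons x xs ih =>
    simp only [List.mem_cons, not_or] at hp
    simp [pvSkipToFirst, Ne.symm hp.1, ih hp.2]

theorem pvSkip_none (n : Int) (l : List Int) (hl : n ∉ l) :
    pvSkipToFirst l n = none := by
  have := pvSkip_append n l [] hl
  simpa using this

theorem pvSpan_append (n : Int) (q l : List Int) (hq : n ∉ q) (s : Int) :
    pvSpanToSecond (q ++ l) n s = pvSpanToSecond l n (s + q.length) := by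
  induction q generalizing s with
  | nil => simp [pvSpanToSecond]
  | cons x xs ih =>
    simp only [List.mem_cons, not_or] at hq
    simp only [List.cons_append, pvSpanToSecond, Ne.symm hq.1, if_false]
    rw [ih hq.2]
    congr 1
    simp
    omega

theorem pvSpan_none (n : Int) (l : List Int) (hl : n ∉ l) (s : Int) :
    pvSpanToSecond l n s = none := by
  have := pvSpan_append n l [] hl s
  simpa using this

theorem pvHasThird_eq (n : Int) (l : List Int) :
    pvHasThird l n = decide (n ∈ l) := by
  induction l with
  | nil => simp [pvHasThird]
  | cons x xs ih =>
    by_cases hx : x = n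
    · simp [pvHasThird, hx]
    · simp [pvHasThird, hx, Ne.symm hx, ih]

theorem count_eq_two_decomp (l : List Int) (n : Int) (h : l.count n = 2) :
    ∃ p q r, l = p ++ n :: (q ++ n :: r) ∧ n ∉ p ∧ n ∉ q ∧ n ∉ r := by
  have h1 : n ∈ l := List.count_pos_iff.1 (by omega)
  obtain ⟨k1, hk1⟩ := Option.isSome_iff_exists.1 ((PySem.List.index?_isSome_iff _ _).2 h1)
  obtain ⟨p, s, rfl, -, hp⟩ := (PySem.List.index?_eq_some_iff _ _ _).1 hk1
  have hs : s.count n = 1 := by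
    simp [List.count_append, List.count_eq_zero_of_not_mem hp] at h
    omega
  have h2 : n ∈ s := List.count_pos_iff.1 (by omega)
  obtain ⟨k2, hk2⟩ := Option.isSome_iff_exists.1 ((PySem.List.index?_isSome_iff _ _).2 h2)
  obtain ⟨q, r, rfl, -, hq⟩ := (PySem.List.index?_eq_some_iff _ _ _).1 hk2
  have hr : n ∉ r := by
    simp [List.count_append, List.count_eq_zero_of_not_mem hq] at hs
    exact List.count_eq_zero.1 hs
  exact ⟨p, q, r, by simp, hp, hq, hr⟩

theorem length_of_sequence_spec' (arr : List Int) (n : Int) :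
    length_of_sequence arr n = length_of_sequence_alt arr n := by
  by_cases hc : arr.count n = 2
  · obtain ⟨p, q, r, rfl, hp, hq, hr⟩ := count_eq_two_decomp arr n hc
    -- A's side: the occurrence list is [p.length, p.length + 1 + q.length]
    have hocc : pvOccGo (p ++ n :: (q ++ n :: r)) n 0 =
        [p.length, p.length + 1 + q.length] := by
      rw [pvOccGo_eq_posAux, posAux_append n p _ hp]
      simp only [posAux, if_pos]
      rw [posAux_append n q _ hq]
      simp only [posAux, if_pos]
      rw [posAux_eq_nil n r hr]
      simp
    unfold length_of_sequence
    rw [hocc]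
    simp only [List.length_cons, List.length_nil]
    rw [if_neg (by simp)]
    have hsl : PySem.List.slice (p ++ n :: (q ++ n :: r))
        (some ((p.length : Nat) : Int)) (some (((p.length + 1 + q.length : Nat) : Int) + 1)) =
        n :: q ++ [n] := by
      have : (((p.length + 1 + q.length : Nat) : Int) + 1) =
          (((p.length + q.length + 2 : Nat) : Int)) := by push_cast; ring
      rw [this, PySem.List.slice_natCast]
      have h2 : p.length + q.length + 2 - p.length = q.length + 2 := by omega
      rw [h2, List.drop_append_of_le_length (Nat.le_refl _)]
      simp only [List.drop_length, List.nil_append]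
      rw [show q.length + 2 = q.length + 1 + 1 by rfl, List.take_succ_cons, List.take_append]
      simp
    simp only [List.getD_cons_zero, List.getD_cons_succ]
    rw [hsl]
    -- B's side: skip p, span across q, nothing left in r
    unfold length_of_sequence_alt
    rw [pvSkip_append n p _ hp]
    simp only [pvSkipToFirst, if_pos]
    rw [pvSpan_append n q _ hq]
    simp only [pvSpanToSecond, if_pos]
    rw [pvHasThird_eq]
    simp [hr]
    ring
  · -- count ≠ 2: both return 0
    have hlen : (pvOccGo arr n 0).length = arr.count n := by
      rw [pvOccGo_eq_posAux]; exact length_posAux n arr 0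
    unfold length_of_sequence
    rw [if_pos (by omega)]
    unfold length_of_sequence_alt
    by_cases h1 : n ∈ arr
    · obtain ⟨k1, hk1⟩ := Option.isSome_iff_exists.1 ((PySem.List.index?_isSome_iff _ _).2 h1)
      obtain ⟨p, s, rfl, -, hp⟩ := (PySem.List.index?_eq_some_iff _ _ _).1 hk1
      rw [pvSkip_append n p _ hp]
      simp only [pvSkipToFirst, if_pos]
      by_cases h2 : n ∈ s
      · obtain ⟨k2, hk2⟩ := Option.isSome_iff_exists.1 ((PySem.List.index?_isSome_iff _ _).2 h2)
        obtain ⟨q, r, rfl, -, hq⟩ := (PySem.List.index?_eq_some_iff _ _ _).1 hk2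
        rw [pvSpan_append n q _ hq]
        simp only [pvSpanToSecond, if_pos]
        have hr : n ∈ r := by
          by_contra hr
          apply hc
          simp [List.count_append, List.count_eq_zero_of_not_mem hp,
            List.count_eq_zero_of_not_mem hq, List.count_eq_zero_of_not_mem hr]
        rw [pvHasThird_eq]
        simp [hr]
      · rw [pvSpan_none n s h2]
    · rw [pvSkip_none n arr h1]

-- ===== VERDICT (by name: the statement is the Claim_ definition above) =====
theorem length_of_sequence_spec : Claim_equal_length_of_sequence := by
  intro arr n _
  exact length_of_sequence_spec' arr n
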